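-- pv_equiv track=rewrite | github.com/lbliii/bengal | tests/integration/test_cli_smoke.py | _case_command_key
-- ===== SOURCE A (Python) =====
-- def _case_command_key(args: tuple[str, ...], registered: set[str]) -> str | None:
--     if not args or args[0].startswith("-"):
--         return None
--     parts: list[str] = []
--     match: str | None = None
--     for arg in args:
--         if arg.startswith("-"):
--             break
--         parts.append(arg)
--         candidate = ".".join(parts)
--         if candidate in registered:
--             match = candidate
--     return match
-- ===== SOURCE B (Python) =====
-- def _case_command_key(args, registered):
--     # Phase 1: collect the leading non-option args.
--     leading = []
--     for a in args:
--         if a.startswith("-"):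
--             break
--         leading.append(a)
--     # Phase 2: search longest-first, returning the first registered prefix.
--     for k in range(len(leading), 0, -1):
--         candidate = ".".join(leading[:k])
--         if candidate in registered:
--             return candidate
--     return None
-- ===== Notes on version B (the rewrite author's own statement) =====
-- stated objective: alternative
-- what changed: B splits the work into two phases - first collect the leading non-option args, then search prefixes longest-first with an early return on the first registered match - instead of A's single ascending loop that interleaves joining, membership tests and keeping the last match; the empty/leading-dash guard disappears because an empty leading run naturally yields None.
import Mathlib
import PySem

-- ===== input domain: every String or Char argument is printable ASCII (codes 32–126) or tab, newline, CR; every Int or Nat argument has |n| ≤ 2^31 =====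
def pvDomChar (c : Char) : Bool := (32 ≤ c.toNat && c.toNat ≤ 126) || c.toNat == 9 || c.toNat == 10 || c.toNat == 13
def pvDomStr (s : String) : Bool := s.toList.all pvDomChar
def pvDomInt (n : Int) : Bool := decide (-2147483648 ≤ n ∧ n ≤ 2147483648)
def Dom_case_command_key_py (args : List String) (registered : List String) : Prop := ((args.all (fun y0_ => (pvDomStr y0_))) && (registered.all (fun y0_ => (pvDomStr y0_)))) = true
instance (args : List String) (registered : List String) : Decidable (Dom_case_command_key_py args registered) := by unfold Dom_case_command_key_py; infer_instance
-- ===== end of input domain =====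

-- B's change: two phases (collect leading non-option args, then search prefixes longest-first
-- with early return) instead of A's single ascending last-match loop; same return value.

-- ===== PORT A =====
-- A's for-loop with break, state = (parts, match)
def caseALoop (registered : List String) : List String → List String → Option String → Option String
  | [], _, m => m
  | a :: rest, parts, m =>
    if PySem.Str.startswith a "-" then m
    else
      let parts' := parts ++ [a]
      let candidate := PySem.Str.join "." parts'
      let m' := if PySem.Set.contains registered candidate then some candidate else m
      caseALoop registered rest parts' m'

def case_command_key_py (args : List String) (registered : List String) : Option String :=
  match args with
  | [] => none
  | a0 :: _ =>
    if PySem.Str.startswith a0 "-" then none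
    else caseALoop registered args [] none

-- ===== PORT B =====
-- phase 1: the leading run of non-option args (A's/B's first loop with break)
def leadingArgs : List String → List String
  | [] => []
  | a :: rest => if PySem.Str.startswith a "-" then [] else a :: leadingArgs rest

-- phase 2: for k in range(len(leading), 0, -1): early-return the first registered candidate
def searchDesc (registered : List String) (leading : List String) : Nat → Option String
  | 0 => none
  | k + 1 =>
    let candidate := PySem.Str.join "." (leading.take (k + 1))
    if PySem.Set.contains registered candidate then some candidate
    else searchDesc registered leading k

def case_command_key_py_alt (args : List String) (registered : List String) : Option String :=
  let leading := leadingArgs args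
  searchDesc registered leading leading.length

-- ===== PRECONDITION & SPEC =====
def Spec_case_command_key_py (args : List String) (registered : List String) (out : Option String) : Prop := out = case_command_key_py_alt args registered
instance (args : List String) (registered : List String) (out : Option String) : Decidable (Spec_case_command_key_py args registered out) := by unfold Spec_case_command_key_py; infer_instance

-- ===== CLAIM (what is proved, stated in full; the proofs are below) =====
def Claim_equal_case_command_key_py : Prop := ∀ (args : List String) (registered : List String), Dom_case_command_key_py args registered → Spec_case_command_key_py args registered (case_command_key_py args registered)

-- ===== LEMMAS AND PROOFS =====

-- descending search from k down to lo+1 (generalisation of searchDesc, which is lo = 0)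
def sdLo (registered : List String) (leading : List String) (lo : Nat) : Nat → Option String
  | 0 => none
  | k + 1 =>
    if k + 1 ≤ lo then none
    else
      let candidate := PySem.Str.join "." (leading.take (k + 1))
      if PySem.Set.contains registered candidate then some candidate
      else sdLo registered leading lo k

theorem searchDesc_eq_sdLo (reg l : List String) (k : Nat) :
    searchDesc reg l k = sdLo reg l 0 k := by
  induction k with
  | zero => rfl
  | succ k ih => simp [searchDesc, sdLo, ih]

theorem sdLo_of_le (reg l : List String) (lo k : Nat) (h : k ≤ lo) :
    sdLo reg l lo k = none := by
  induction k with
  | zero => rfl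
  | succ k ih =>
    have h1 : k + 1 ≤ lo := h
    simp [sdLo, h1]

-- peel the bottom of the descending range
theorem sdLo_peel (reg l : List String) (lo k : Nat) (h : lo < k) :
    sdLo reg l lo k =
      (sdLo reg l (lo + 1) k).orElse
        (fun _ => if PySem.Set.contains reg (PySem.Str.join "." (l.take (lo + 1)))
                  then some (PySem.Str.join "." (l.take (lo + 1))) else none) := by
  induction k with
  | zero => omega
  | succ k ih =>
    by_cases hk : lo = k
    · subst hk
      have h1 : ¬ (lo + 1 ≤ lo) := by omega
      simp only [sdLo, sdLo_of_le reg l lo lo (Nat.le_refl _)]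
      simp [h1, Option.orElse]
    · have hlt : lo < k := by omega
      have h1 : ¬ (k + 1 ≤ lo) := by omega
      have h2 : ¬ (k + 1 ≤ lo + 1) := by omega
      simp only [sdLo, h1, h2, if_false, ih hlt]
      cases PySem.Set.contains reg (PySem.Str.join "." (l.take (k + 1))) <;>
        simp [Option.orElse]

-- main loop invariant: A's loop equals the descending search over the new prefixes, falling back to m
theorem caseALoop_eq (reg : List String) (rest parts : List String) (m : Option String) :
    caseALoop reg rest parts m =
      (sdLo reg (parts ++ leadingArgs rest) parts.length
        (parts.length + (leadingArgs rest).length)).orElse (fun _ => m) := by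
  induction rest generalizing parts m with
  | nil =>
    simp [caseALoop, leadingArgs, sdLo_of_le reg parts parts.length parts.length (Nat.le_refl _),
      Option.orElse]
  | cons a rest ih =>
    cases ha : PySem.Str.startswith a "-" with
    | true =>
      have ha' : PySem.Chars.startswith a.toList ['-'] = true := by simpa using ha
      simp [caseALoop, leadingArgs, ha',
        sdLo_of_le reg parts parts.length parts.length (Nat.le_refl _), Option.orElse]
    | false =>
      have ha' : PySem.Chars.startswith a.toList ['-'] = false := by simpa using ha
      simp only [caseALoop, leadingArgs, ha, Bool.false_eq_true, if_false]
      rw [ih]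
      have hl : (parts ++ [a]) ++ leadingArgs rest = parts ++ a :: leadingArgs rest := by
        simp
      have htake : (parts ++ [a] ++ leadingArgs rest).take (parts.length + 1) = parts ++ [a] := by
        rw [List.take_append_of_le_length (by simp)]
        simp
      rw [hl]
      have hlen : (parts ++ [a]).length = parts.length + 1 := by simp
      rw [hlen]
      have hk : parts.length + (a :: leadingArgs rest).length
          = parts.length + 1 + (leadingArgs rest).length := by simp; omega
      rw [hk]
      rw [sdLo_peel reg (parts ++ a :: leadingArgs rest) parts.length
          (parts.length + 1 + (leadingArgs rest).length) (by omega)]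
      rw [← hl, htake]
      -- orElse associativity and folding m' into the fallback
      set X := sdLo reg (parts ++ [a] ++ leadingArgs rest) (parts.length + 1)
        (parts.length + 1 + (leadingArgs rest).length) with hX
      cases X <;> cases PySem.Set.contains reg (PySem.Str.join "." (parts ++ [a])) <;>
        simp [Option.orElse]

-- ===== VERDICT (by name: the statement is the Claim_ definition above) =====
theorem case_command_key_py_spec : Claim_equal_case_command_key_py := by
  intro args registered _
  unfold Spec_case_command_key_py case_command_key_py case_command_key_py_alt
  match args with
  | [] => simp [leadingArgs, searchDesc]
  | a0 :: rest =>
    cases h0 : PySem.Str.startswith a0 "-" with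
    | true =>
      have h0' : PySem.Chars.startswith a0.toList ['-'] = true := by simpa using h0
      simp [leadingArgs, searchDesc, h0']
    | false =>
      have h0' : PySem.Chars.startswith a0.toList ['-'] = false := by simpa using h0
      simp only [h0, Bool.false_eq_true, if_false, leadingArgs]
      rw [caseALoop_eq registered (a0 :: rest) [] none, searchDesc_eq_sdLo]
      simp only [List.nil_append, List.length_nil, Nat.zero_add]
      simp only [leadingArgs, h0, Bool.false_eq_true, if_false]
      cases sdLo registered (a0 :: leadingArgs rest) 0 (a0 :: leadingArgs rest).length <;>
        simp [Option.orElse]
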